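-- pv_equiv track=rewrite | github.com/PhamAnhTienn/Anomaly-Detection | utils/anomaly_detection.py | group_anomalies
-- ===== SOURCE A (Python) =====
-- def group_anomalies(anomalies, gap=1):
--     grouped_anomalies = []
--     current_group = [anomalies[0]]
--
--     for i in range(1, len(anomalies)):
--         if anomalies[i] <= current_group[-1] + gap:
--             current_group.append(anomalies[i])
--         else:
--             grouped_anomalies.append(current_group)
--             current_group = [anomalies[i]]
--
--     grouped_anomalies.append(current_group)
--
--     return grouped_anomalies
-- ===== SOURCE B (Python) =====
-- def group_anomalies(anomalies, gap=1):
--     n = len(anomalies)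
--     breaks = [i for i in range(1, n) if anomalies[i] > anomalies[i - 1] + gap]
--     bounds = [0] + breaks + [n]
--     return [list(anomalies[lo:hi]) for lo, hi in zip(bounds, bounds[1:])]
-- ===== Notes on version B (the rewrite author's own statement) =====
-- stated objective: alternative
-- what changed: B computes all break indices up front with one comprehension and returns the groups as slices between consecutive boundaries, instead of incrementally accumulating and flushing a current_group.
import Mathlib
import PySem

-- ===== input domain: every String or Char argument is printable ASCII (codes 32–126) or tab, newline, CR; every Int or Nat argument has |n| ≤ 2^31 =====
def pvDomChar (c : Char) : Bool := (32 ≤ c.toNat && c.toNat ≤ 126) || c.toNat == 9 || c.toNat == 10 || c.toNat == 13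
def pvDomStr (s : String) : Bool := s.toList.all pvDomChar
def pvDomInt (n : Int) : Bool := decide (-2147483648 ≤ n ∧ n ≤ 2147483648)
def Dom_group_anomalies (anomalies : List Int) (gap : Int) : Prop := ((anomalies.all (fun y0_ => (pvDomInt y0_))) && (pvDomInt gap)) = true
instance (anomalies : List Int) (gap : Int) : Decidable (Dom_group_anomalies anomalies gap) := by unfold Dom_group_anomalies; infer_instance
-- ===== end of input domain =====

-- B computes all break indices up front and returns slices between consecutive boundaries
-- (alternative decomposition of the same one-pass grouping; A raises IndexError on [], excluded by Pre_).


-- ===== PORT A =====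
-- the loop body: state = (grouped_anomalies, current_group); v = anomalies[i]
def groupAStep (gap : Int) (st : List (List Int) × List Int) (v : Int) : List (List Int) × List Int :=
  if v ≤ st.2.getLastD 0 + gap then (st.1, st.2 ++ [v])
  else (st.1 ++ [st.2], [v])

def group_anomalies (anomalies : List Int) (gap : Int) : List (List Int) :=
  match anomalies with
  | [] => []  -- Python raises IndexError on anomalies[0]; excluded by Pre_
  | a0 :: _ =>
    ((PySem.List.pyRange 1 (anomalies.length : Int) 1).foldl
      (fun st i => groupAStep gap st (PySem.List.pyGetD anomalies i 0)) ([], [a0])).1 ++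
    [((PySem.List.pyRange 1 (anomalies.length : Int) 1).foldl
      (fun st i => groupAStep gap st (PySem.List.pyGetD anomalies i 0)) ([], [a0])).2]

-- ===== PORT B =====
-- breaks = [i for i in range(1, n) if anomalies[i] > anomalies[i-1] + gap]
def altBreaks (anomalies : List Int) (gap : Int) : List Int :=
  (PySem.List.pyRange 1 (anomalies.length : Int) 1).filter
    (fun i => decide (PySem.List.pyGetD anomalies (i - 1) 0 + gap < PySem.List.pyGetD anomalies i 0))

def group_anomalies_alt (anomalies : List Int) (gap : Int) : List (List Int) :=
  ((0 :: (altBreaks anomalies gap ++ [(anomalies.length : Int)])).zip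
      (altBreaks anomalies gap ++ [(anomalies.length : Int)])).map
    (fun p => PySem.List.slice anomalies (some p.1) (some p.2))

-- ===== PRECONDITION & SPEC =====
-- Pre_ excludes only the empty list, on which A raises IndexError (anomalies[0]).
def Pre_group_anomalies (anomalies : List Int) (gap : Int) : Prop := anomalies ≠ []
instance (anomalies : List Int) (gap : Int) : Decidable (Pre_group_anomalies anomalies gap) := by unfold Pre_group_anomalies; infer_instance
def pvWitness_group_anomalies : List Int × Int := ([1, 2, 5, 6, 10], 1)

def Spec_group_anomalies (anomalies : List Int) (gap : Int) (out : List (List Int)) : Prop := out = group_anomalies_alt anomalies gap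
instance (anomalies : List Int) (gap : Int) (out : List (List Int)) : Decidable (Spec_group_anomalies anomalies gap out) := by unfold Spec_group_anomalies; infer_instance

-- ===== CLAIM (what is proved, stated in full; the proofs are below) =====
def Claim_equal_group_anomalies : Prop := ∀ (anomalies : List Int) (gap : Int), Dom_group_anomalies anomalies gap → Pre_group_anomalies anomalies gap → Spec_group_anomalies anomalies gap (group_anomalies anomalies gap)

-- ===== LEMMAS AND PROOFS =====

-- common structural grouping: grp gap cur last t runs A's loop body structurally over t
def grp (gap : Int) (cur : List Int) (last : Int) : List Int → List (List Int)
  | [] => [cur]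
  | x :: t => if x ≤ last + gap then grp gap (cur ++ [x]) x t else cur :: grp gap [x] x t

-- break positions (1-based) of adjacent pairs exceeding gap
def brk (gap : Int) : List Int → List Nat
  | x :: y :: t => if x + gap < y then 1 :: (brk gap (y :: t)).map (· + 1) else (brk gap (y :: t)).map (· + 1)
  | _ => []

-- slices between consecutive boundaries, structurally
def cuts (xs : List Int) : Nat → List Nat → List (List Int)
  | lo, [] => [xs.drop lo]
  | lo, b :: bs => (xs.drop lo).take (b - lo) :: cuts xs b bs

-- A's fold equals grp
theorem foldA_eq_grp (gap : Int) (t : List Int) : ∀ (acc : List (List Int)) (cur : List Int) (last : Int),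
    cur.getLastD 0 = last →
    (let st := t.foldl (groupAStep gap) (acc, cur); st.1 ++ [st.2]) = acc ++ grp gap cur last t := by
  induction t with
  | nil => intro acc cur last _; simp [grp]
  | cons x t ih =>
    intro acc cur last hl
    simp only [List.foldl_cons, grp, groupAStep, hl]
    by_cases h : x ≤ last + gap
    · simp only [h, if_pos]
      exact ih acc (cur ++ [x]) x (by simp)
    · simp only [h, if_false]
      rw [ih (acc ++ [cur]) [x] x (by simp)]
      simp

theorem grp_cons_head (gap x : Int) (t : List Int) : ∀ (cur : List Int) (last : Int),
    grp gap (x :: cur) last t = (grp gap cur last t).modifyHead (x :: ·) := by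
  induction t with
  | nil => intro cur last; simp [grp]
  | cons z t ih =>
    intro cur last
    simp only [grp]
    by_cases h : z ≤ last + gap
    · simp only [h, if_pos]
      have : x :: cur ++ [z] = x :: (cur ++ [z]) := by simp
      rw [this, ih]
    · simp [h]

theorem cuts_shift (x : Int) (xs : List Int) : ∀ (bs : List Nat) (lo : Nat),
    cuts (x :: xs) (lo + 1) (bs.map (· + 1)) = cuts xs lo bs := by
  intro bs
  induction bs with
  | nil => intro lo; simp [cuts]
  | cons b bs ih =>
    intro lo
    simp only [List.map_cons, cuts, List.drop_succ_cons]
    rw [Nat.add_sub_add_right, ih]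

theorem cuts_cons_zero (x : Int) (xs : List Int) (bs : List Nat) :
    cuts (x :: xs) 0 (bs.map (· + 1)) = (cuts xs 0 bs).modifyHead (x :: ·) := by
  cases bs with
  | nil => simp [cuts]
  | cons b bs =>
    simp only [List.map_cons, cuts, Nat.sub_zero, List.drop_zero, List.take_succ_cons,
      List.modifyHead_cons]
    exact congrArg _ (cuts_shift x xs bs b)

theorem cuts_eq_grp (gap : Int) : ∀ (t : List Int) (x : Int),
    cuts (x :: t) 0 (brk gap (x :: t)) = grp gap [x] x t := by
  intro t
  induction t with
  | nil => intro x; simp [brk, cuts, grp]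
  | cons y t ih =>
    intro x
    by_cases h : x + gap < y
    · simp only [brk, h, if_pos, cuts, List.take_succ_cons, List.take_zero,
        Nat.sub_zero, List.drop_zero]
      have h1 : cuts (x :: y :: t) 1 ((brk gap (y :: t)).map (· + 1)) = cuts (y :: t) 0 (brk gap (y :: t)) := cuts_shift x (y :: t) (brk gap (y :: t)) 0
      rw [h1, ih y, grp]
      simp [show ¬ y ≤ x + gap by omega]
    · simp only [brk, h, if_false]
      rw [cuts_cons_zero, ih y]
      show _ = grp gap [x] x (y :: t)
      rw [grp]
      simp only [show y ≤ x + gap by omega, if_pos]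
      exact (grp_cons_head gap x t [y] y).symm

-- break predicate on Nat indices
def brkPred (xs : List Int) (gap : Int) (k : Nat) : Bool :=
  decide (xs.getD k 0 + gap < xs.getD (k + 1) 0)

theorem brk_filter (gap : Int) : ∀ (xs : List Int),
    ((List.range (xs.length - 1)).filter (brkPred xs gap)).map (· + 1) = brk gap xs := by
  intro xs
  match xs with
  | [] => simp [brk]
  | [x] => simp [brk]
  | x :: y :: t =>
    have hlen : (x :: y :: t).length - 1 = t.length + 1 := by simp
    rw [hlen, List.range_succ_eq_map]
    have hpred0 : brkPred (x :: y :: t) gap 0 = decide (x + gap < y) := by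
      simp [brkPred]
    have hcomp : ∀ k : Nat, brkPred (x :: y :: t) gap (k + 1) = brkPred (y :: t) gap k := by
      intro k; simp [brkPred]
    rw [List.filter_cons, hpred0, List.filter_map]
    have hco : (brkPred (x :: y :: t) gap ∘ (· + 1)) = brkPred (y :: t) gap := by
      funext k; exact hcomp k
    rw [hco]
    have ih := brk_filter gap (y :: t)
    have hlen2 : (y :: t).length - 1 = t.length := by simp
    rw [hlen2] at ih
    have ihs : List.map Nat.succ (List.filter (brkPred (y :: t) gap) (List.range t.length))
        = brk gap (y :: t) := by
      rw [show Nat.succ = (fun x : Nat => x + 1) from funext fun _ => rfl]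
      exact ih
    by_cases h : x + gap < y
    · simp [h, brk, ihs]
    · simp [h, brk, ihs]

-- B's breaks (Int list) are brk, cast
theorem breaks_eq_brk (gap : Int) (xs : List Int) :
    (PySem.List.pyRange 1 (xs.length : Int) 1).filter
      (fun i => decide (PySem.List.pyGetD xs (i - 1) 0 + gap < PySem.List.pyGetD xs i 0))
      = List.map Nat.cast (brk gap xs) := by
  rw [PySem.List.pyRange_one, List.filter_map]
  have hc : ((fun i => decide (PySem.List.pyGetD xs (i - 1) 0 + gap < PySem.List.pyGetD xs i 0)) ∘
      (fun k : Nat => (1 : Int) + k)) = brkPred xs gap := by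
    funext k
    simp only [Function.comp]
    have e2 : ((1 : Int) + (k : Nat)) = (((k + 1 : Nat)) : Int) := by push_cast; ring
    have e3 : (((k + 1 : Nat) : Int)) - 1 = ((k : Nat) : Int) := by push_cast; ring
    simp only [e2, e3, PySem.List.pyGetD_natCast]
    rfl
  have hn : (((xs.length : Int) - 1).toNat) = xs.length - 1 := by omega
  rw [hc, hn, ← brk_filter gap xs, List.map_map]
  congr 1
  funext k
  simp only [Function.comp]
  push_cast
  ring

-- B's zip/slice form equals cuts
theorem zip_slice_eq_cuts (xs : List Int) : ∀ (bs : List Nat) (lo : Nat),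
    ((((lo : Nat) : Int) :: (List.map Nat.cast bs ++ [(xs.length : Int)])).zip
        (List.map Nat.cast bs ++ [(xs.length : Int)])).map
      (fun p => PySem.List.slice xs (some p.1) (some p.2)) = cuts xs lo bs := by
  intro bs
  induction bs with
  | nil =>
    intro lo
    simp only [List.map_nil, List.nil_append, List.zip_cons_cons, List.zip_nil_right,
      List.map_cons, List.map_nil, cuts]
    rw [PySem.List.slice_natCast]
    congr 1
    exact List.take_of_length_le (by simp)
  | cons b bs ih =>
    intro lo
    simp only [List.map_cons, List.cons_append, List.zip_cons_cons, List.map_cons, cuts]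
    rw [PySem.List.slice_natCast]
    exact congrArg _ (ih b)

-- ===== VERDICT (by name: the statement is the Claim_ definition above) =====
theorem group_anomalies_spec : Claim_equal_group_anomalies := by
  intro anomalies gap _ hpre
  unfold Spec_group_anomalies
  match anomalies with
  | [] => exact absurd rfl hpre
  | a0 :: t =>
    have hB : group_anomalies_alt (a0 :: t) gap = cuts (a0 :: t) 0 (brk gap (a0 :: t)) := by
      unfold group_anomalies_alt altBreaks
      rw [breaks_eq_brk]
      have h0 : (0 : Int) = ((0 : Nat) : Int) := rfl
      rw [h0, zip_slice_eq_cuts]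
    have hA : group_anomalies (a0 :: t) gap = grp gap [a0] a0 t := by
      show ((PySem.List.pyRange 1 ((a0 :: t).length : Int) 1).foldl
          (fun st i => groupAStep gap st (PySem.List.pyGetD (a0 :: t) i 0)) ([], [a0])).1 ++
        [((PySem.List.pyRange 1 ((a0 :: t).length : Int) 1).foldl
          (fun st i => groupAStep gap st (PySem.List.pyGetD (a0 :: t) i 0)) ([], [a0])).2] = _
      rw [PySem.List.foldl_pyRange_pyGetD' (a0 :: t) (0 : Int) (groupAStep gap)
        (([], [a0]) : List (List Int) × List Int) (a := 1) (by norm_num)]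
      exact foldA_eq_grp gap t [] [a0] a0 (by simp)
    rw [hA, hB, cuts_eq_grp]
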